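-- pv_equiv track=rewrite | github.com/or-m-or/KT-AIVLE-School-5th_Codingmasters | example/round2/Beginner/Q8682_압축된수열/A8682.py | find_min_base
-- ===== SOURCE A (Python) =====
-- def convert_length(num: int, base: int) -> int:
--     length = 0
--     while num > 0:
--         num //= base
--         length += 1
--     return max(length, 1)
--
-- def find_min_base(file: list, M: int) -> int:
--     for base in range(10, 63):
--         temp_length = 0
--         for num in file:
--             temp_length += convert_length(num, base)
--         temp_length += (len(file)-1)
--
--         if temp_length <= M:
--             return base
--     return -1
-- ===== SOURCE B (Python) =====
-- def _digits(num: int, base: int) -> int: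
--     length = 0
--     while num > 0:
--         num //= base
--         length += 1
--     return max(length, 1)
--
-- def _total_length(file: list, base: int) -> int:
--     t = 0
--     for num in file:
--         t += _digits(num, base)
--     return t + len(file) - 1
--
-- def find_min_base(file: list, M: int) -> int:
--     # total length is non-increasing in base, so binary-search the first base in [10, 62]
--     lo, hi = 10, 62
--     while lo < hi:
--         mid = (lo + hi) // 2
--         if _total_length(file, mid) <= M:
--             hi = mid
--         else:
--             lo = mid + 1
--     return lo if _total_length(file, lo) <= M else -1
-- ===== Notes on version B (the rewrite author's own statement) =====
-- stated objective: faster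
-- what changed: Replaces A's linear scan over bases 10..62 by a binary search for the first base whose total compressed length is <= M, exploiting that the total length is non-increasing in the base, so only ~6 instead of up to 53 total-length evaluations are needed.
import Mathlib
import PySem

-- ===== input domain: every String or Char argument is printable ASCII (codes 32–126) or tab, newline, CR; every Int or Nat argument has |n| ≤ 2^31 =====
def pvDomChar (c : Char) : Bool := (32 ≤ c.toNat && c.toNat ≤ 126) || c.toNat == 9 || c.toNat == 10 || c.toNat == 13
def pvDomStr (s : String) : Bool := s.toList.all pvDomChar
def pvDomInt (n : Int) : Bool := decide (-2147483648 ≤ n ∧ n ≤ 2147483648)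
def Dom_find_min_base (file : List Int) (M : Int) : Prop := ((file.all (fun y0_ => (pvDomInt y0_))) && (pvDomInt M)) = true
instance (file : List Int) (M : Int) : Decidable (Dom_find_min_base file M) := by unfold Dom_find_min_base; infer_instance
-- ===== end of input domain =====

-- B replaces A's linear scan over bases 10..62 with a binary search for the first base whose
-- total compressed length is ≤ M (the total is non-increasing in the base); alternative decomposition.

-- ===== PORT A =====
-- termination fact for the digit-count loop, cited by decreasing_by
theorem pvFloordivLt (num base : Int) (h1 : 0 < num) (h2 : 2 ≤ base) :
    (PySem.Int.floordiv num base).toNat < num.toNat := by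
  have hb : (0:Int) < base := by omega
  have hlt : PySem.Int.floordiv num base < num := by
    rw [PySem.Int.floordiv_lt_iff_lt_mul hb]
    have : num * 2 ≤ num * base := mul_le_mul_of_nonneg_left h2 (by omega)
    omega
  omega

-- `while num > 0: num //= base; length += 1` (the `else 0` guard on base is unreachable:
-- both programs only call this with base in [10, 62]; it only makes the recursion total)
def convertLoop (num base length : Int) : Int :=
  if h1 : 0 < num then
    if h2 : 2 ≤ base then convertLoop (PySem.Int.floordiv num base) base (length + 1)
    else 0
  else length
termination_by num.toNat
decreasing_by exact pvFloordivLt num base h1 h2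

def convert_length (num base : Int) : Int := max (convertLoop num base 0) 1

def scanA (file : List Int) (M base : Int) : Int :=
  if h : base < 63 then
    if file.foldl (fun acc num => acc + convert_length num base) 0 + ((file.length : Int) - 1) ≤ M
    then base else scanA file M (base + 1)
  else -1
termination_by (63 - base).toNat
decreasing_by omega

def find_min_base (file : List Int) (M : Int) : Int := scanA file M 10

-- ===== PORT B =====
def totalLen (file : List Int) (base : Int) : Int :=
  file.foldl (fun t num => t + convert_length num base) 0 + (file.length : Int) - 1

def bsearch (file : List Int) (M lo hi : Int) : Int :=
  if h : lo < hi then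
    if totalLen file (PySem.Int.floordiv (lo + hi) 2) ≤ M
    then bsearch file M lo (PySem.Int.floordiv (lo + hi) 2)
    else bsearch file M (PySem.Int.floordiv (lo + hi) 2 + 1) hi
  else lo
termination_by (hi - lo).toNat
decreasing_by
  · have := PySem.Int.floordiv_two_mid_bounds (lo := lo) (hi := hi) (by omega)
    have hlt : PySem.Int.floordiv (lo + hi) 2 < hi := by
      rw [PySem.Int.floordiv_lt_iff_lt_mul (by omega : (0:Int) < 2)]; omega
    omega
  · have := PySem.Int.floordiv_two_mid_bounds (lo := lo) (hi := hi) (by omega)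
    omega

def find_min_base_alt (file : List Int) (M : Int) : Int :=
  let lo := bsearch file M 10 62
  if totalLen file lo ≤ M then lo else -1

-- ===== PRECONDITION & SPEC =====
def Spec_find_min_base (file : List Int) (M : Int) (out : Int) : Prop := out = find_min_base_alt file M
instance (file : List Int) (M : Int) (out : Int) : Decidable (Spec_find_min_base file M out) := by unfold Spec_find_min_base; infer_instance

-- ===== CLAIM (what is proved, stated in full; the proofs are below) =====
def Claim_equal_find_min_base : Prop := ∀ (file : List Int) (M : Int), Dom_find_min_base file M → Spec_find_min_base file M (find_min_base file M)

-- ===== LEMMAS AND PROOFS =====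

theorem fd_nonneg (num base : Int) (hn : 0 ≤ num) (hb : 0 < base) :
    0 ≤ PySem.Int.floordiv num base := by
  rw [PySem.Int.le_floordiv_iff_mul_le hb]; omega

theorem fd_mul_le (num base : Int) (hb : 0 < base) :
    (PySem.Int.floordiv num base) * base ≤ num :=
  (PySem.Int.le_floordiv_iff_mul_le hb).mp le_rfl

theorem fd_mono_num (a b c : Int) (hc : 0 < c) (hab : a ≤ b) :
    PySem.Int.floordiv a c ≤ PySem.Int.floordiv b c := by
  rw [PySem.Int.le_floordiv_iff_mul_le hc]
  exact le_trans (fd_mul_le a c hc) hab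

theorem fd_anti_base (num b1 b2 : Int) (hn : 0 ≤ num) (h1 : 0 < b1) (h12 : b1 ≤ b2) :
    PySem.Int.floordiv num b2 ≤ PySem.Int.floordiv num b1 := by
  rw [PySem.Int.le_floordiv_iff_mul_le h1]
  have hq : 0 ≤ PySem.Int.floordiv num b2 := fd_nonneg num b2 hn (by omega)
  calc PySem.Int.floordiv num b2 * b1 ≤ PySem.Int.floordiv num b2 * b2 :=
        mul_le_mul_of_nonneg_left h12 hq
    _ ≤ num := fd_mul_le num b2 (by omega)

theorem convertLoop_nonpos (num base l : Int) (h : ¬ 0 < num) :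
    convertLoop num base l = l := by
  rw [convertLoop]; simp [h]

theorem convertLoop_pos (num base l : Int) (h1 : 0 < num) (h2 : 2 ≤ base) :
    convertLoop num base l = convertLoop (PySem.Int.floordiv num base) base (l + 1) := by
  rw [convertLoop]; simp [h1, h2]

theorem convert_shift_aux (n : Nat) : ∀ (num base l : Int), num.toNat ≤ n → 2 ≤ base →
    convertLoop num base l = l + convertLoop num base 0 := by
  induction n with
  | zero =>
    intro num base l h hb
    have hnp : ¬ 0 < num := by omega
    rw [convertLoop_nonpos _ _ _ hnp, convertLoop_nonpos _ _ _ hnp]; omega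
  | succ n ih =>
    intro num base l h hb
    by_cases hp : 0 < num
    · have hlt := pvFloordivLt num base hp hb
      rw [convertLoop_pos _ _ _ hp hb, convertLoop_pos _ _ _ hp hb,
        ih _ base (l + 1) (by omega) hb, ih _ base (0 + 1) (by omega) hb]
      omega
    · rw [convertLoop_nonpos _ _ _ hp, convertLoop_nonpos _ _ _ hp]; omega

theorem convert_shift (num base l : Int) (hb : 2 ≤ base) :
    convertLoop num base l = l + convertLoop num base 0 :=
  convert_shift_aux num.toNat num base l le_rfl hb

theorem convertLoop_nonneg_aux (n : Nat) : ∀ (num base : Int), num.toNat ≤ n → 2 ≤ base →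
    0 ≤ convertLoop num base 0 := by
  induction n with
  | zero =>
    intro num base h hb
    rw [convertLoop_nonpos _ _ _ (by omega)]
  | succ n ih =>
    intro num base h hb
    by_cases hp : 0 < num
    · have hlt := pvFloordivLt num base hp hb
      rw [convertLoop_pos _ _ _ hp hb, convert_shift _ _ _ hb]
      have := ih (PySem.Int.floordiv num base) base (by omega) hb
      omega
    · rw [convertLoop_nonpos _ _ _ hp]

theorem convertLoop_nonneg (num base : Int) (hb : 2 ≤ base) :
    0 ≤ convertLoop num base 0 :=
  convertLoop_nonneg_aux num.toNat num base le_rfl hb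

theorem convert_mono_aux (n : Nat) : ∀ (a c base : Int), c.toNat ≤ n → 2 ≤ base → a ≤ c →
    convertLoop a base 0 ≤ convertLoop c base 0 := by
  induction n with
  | zero =>
    intro a c base h hb hac
    have hcp : ¬ 0 < c := by omega
    have hap : ¬ 0 < a := by omega
    rw [convertLoop_nonpos _ _ _ hap, convertLoop_nonpos _ _ _ hcp]
  | succ n ih =>
    intro a c base h hb hac
    by_cases hap : 0 < a
    · have hcp : 0 < c := by omega
      have hlt := pvFloordivLt c base hcp hb
      rw [convertLoop_pos _ _ _ hap hb, convertLoop_pos _ _ _ hcp hb,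
        convert_shift _ _ _ hb, convert_shift (PySem.Int.floordiv c base) _ _ hb]
      have := ih (PySem.Int.floordiv a base) (PySem.Int.floordiv c base) base (by omega) hb
        (fd_mono_num a c base (by omega) hac)
      omega
    · rw [convertLoop_nonpos _ _ _ hap]
      exact convertLoop_nonneg c base hb

theorem convert_anti_aux (n : Nat) : ∀ (num b1 b2 : Int), num.toNat ≤ n → 2 ≤ b1 → b1 ≤ b2 →
    convertLoop num b2 0 ≤ convertLoop num b1 0 := by
  induction n with
  | zero =>
    intro num b1 b2 h h1 h12
    have hnp : ¬ 0 < num := by omega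
    rw [convertLoop_nonpos _ _ _ hnp, convertLoop_nonpos _ _ _ hnp]
  | succ n ih =>
    intro num b1 b2 h h1 h12
    have h2 : 2 ≤ b2 := by omega
    by_cases hp : 0 < num
    · have hlt := pvFloordivLt num b1 hp h1
      rw [convertLoop_pos _ _ _ hp h1, convertLoop_pos _ _ _ hp h2,
        convert_shift _ _ _ h1, convert_shift _ _ _ h2]
      have hm : convertLoop (PySem.Int.floordiv num b2) b2 0 ≤ convertLoop (PySem.Int.floordiv num b1) b2 0 :=
        convert_mono_aux (PySem.Int.floordiv num b1).toNat _ _ b2 le_rfl h2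
          (fd_anti_base num b1 b2 (by omega) (by omega) h12)
      have ha : convertLoop (PySem.Int.floordiv num b1) b2 0 ≤ convertLoop (PySem.Int.floordiv num b1) b1 0 :=
        ih _ b1 b2 (by omega) h1 h12
      omega
    · rw [convertLoop_nonpos _ _ _ hp, convertLoop_nonpos _ _ _ hp]

theorem convert_length_anti (num b1 b2 : Int) (h1 : 2 ≤ b1) (h12 : b1 ≤ b2) :
    convert_length num b2 ≤ convert_length num b1 := by
  unfold convert_length
  exact max_le_max (convert_anti_aux num.toNat num b1 b2 le_rfl h1 h12) le_rfl

theorem fold_anti (b1 b2 : Int) (h1 : 2 ≤ b1) (h12 : b1 ≤ b2) :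
    ∀ (file : List Int) (acc1 acc2 : Int), acc2 ≤ acc1 →
    file.foldl (fun t num => t + convert_length num b2) acc2 ≤
      file.foldl (fun t num => t + convert_length num b1) acc1 := by
  intro file
  induction file with
  | nil => intro acc1 acc2 h; simpa using h
  | cons x xs ih =>
    intro acc1 acc2 h
    simp only [List.foldl_cons]
    exact ih _ _ (by have := convert_length_anti x b1 b2 h1 h12; omega)

theorem totalLen_anti (file : List Int) (b1 b2 : Int) (h1 : 2 ≤ b1) (h12 : b1 ≤ b2) :
    totalLen file b2 ≤ totalLen file b1 := by
  unfold totalLen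
  have := fold_anti b1 b2 h1 h12 file 0 0 le_rfl
  omega

theorem ok_mono (file : List Int) (M b1 b2 : Int) (h1 : 2 ≤ b1) (h12 : b1 ≤ b2)
    (h : totalLen file b1 ≤ M) : totalLen file b2 ≤ M :=
  le_trans (totalLen_anti file b1 b2 h1 h12) h

theorem temp_eq (file : List Int) (base : Int) :
    file.foldl (fun acc num => acc + convert_length num base) 0 + ((file.length : Int) - 1) =
      totalLen file base := by
  unfold totalLen; ring

theorem bsearch_spec (file : List Int) (M : Int) : ∀ (n : Nat) (lo hi : Int),
    (hi - lo).toNat ≤ n → 2 ≤ lo → lo ≤ hi →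
    lo ≤ bsearch file M lo hi ∧ bsearch file M lo hi ≤ hi ∧
      (∀ b, lo ≤ b → b < bsearch file M lo hi → ¬ totalLen file b ≤ M) ∧
      (totalLen file (bsearch file M lo hi) ≤ M ∨ bsearch file M lo hi = hi) := by
  intro n
  induction n with
  | zero =>
    intro lo hi h h2 hle
    have heq : lo = hi := by omega
    subst heq
    rw [bsearch, dif_neg (lt_irrefl lo)]
    exact ⟨le_rfl, le_rfl, fun b hb1 hb2 => absurd hb2 (by omega), Or.inr rfl⟩
  | succ n ih =>
    intro lo hi h h2 hle
    by_cases hl : lo < hi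
    · obtain ⟨hm1, hm2⟩ := PySem.Int.floordiv_two_mid_bounds (lo := lo) (hi := hi) hle
      have hmidlt : PySem.Int.floordiv (lo + hi) 2 < hi := by
        rw [PySem.Int.floordiv_lt_iff_lt_mul (by omega : (0:Int) < 2)]; omega
      by_cases hok : totalLen file (PySem.Int.floordiv (lo + hi) 2) ≤ M
      · have hstep : bsearch file M lo hi = bsearch file M lo (PySem.Int.floordiv (lo + hi) 2) := by
          rw [bsearch, dif_pos hl, if_pos hok]
        rw [hstep]
        obtain ⟨r1, r2, r3, r4⟩ := ih lo (PySem.Int.floordiv (lo + hi) 2) (by omega) h2 (by omega)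
        refine ⟨r1, by omega, r3, ?_⟩
        rcases r4 with h' | h'
        · exact Or.inl h'
        · exact Or.inl (by rw [h']; exact hok)
      · have hstep : bsearch file M lo hi = bsearch file M (PySem.Int.floordiv (lo + hi) 2 + 1) hi := by
          rw [bsearch, dif_pos hl, if_neg hok]
        rw [hstep]
        obtain ⟨r1, r2, r3, r4⟩ := ih (PySem.Int.floordiv (lo + hi) 2 + 1) hi (by omega) (by omega) (by omega)
        refine ⟨by omega, r2, ?_, r4⟩
        intro b hb1 hb2
        by_cases hbm : b ≤ PySem.Int.floordiv (lo + hi) 2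
        · intro hbok
          exact hok (ok_mono file M b _ (by omega) hbm hbok)
        · exact r3 b (by omega) hb2
    · have heq : lo = hi := by omega
      subst heq
      rw [bsearch, dif_neg (lt_irrefl lo)]
      exact ⟨le_rfl, le_rfl, fun b hb1 hb2 => absurd hb2 (by omega), Or.inr rfl⟩

theorem scanA_found (file : List Int) (M : Int) : ∀ (n : Nat) (lo r : Int),
    (r - lo).toNat ≤ n → lo ≤ r → r ≤ 62 →
    (∀ b, lo ≤ b → b < r → ¬ totalLen file b ≤ M) → totalLen file r ≤ M →
    scanA file M lo = r := by
  intro n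
  induction n with
  | zero =>
    intro lo r h hle h62 hall hr
    have heq : lo = r := by omega
    subst heq
    rw [scanA, dif_pos (show lo < 63 by omega)]
    rw [if_pos (by rw [temp_eq]; exact hr)]
  | succ n ih =>
    intro lo r h hle h62 hall hr
    by_cases heq : lo = r
    · subst heq
      rw [scanA, dif_pos (show lo < 63 by omega)]
      rw [if_pos (by rw [temp_eq]; exact hr)]
    · have hlt : lo < r := by omega
      rw [scanA, dif_pos (show lo < 63 by omega)]
      rw [if_neg (by rw [temp_eq]; exact hall lo le_rfl hlt)]
      exact ih (lo + 1) r (by omega) (by omega) h62 (fun b hb1 hb2 => hall b (by omega) hb2) hr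

theorem scanA_none (file : List Int) (M : Int) : ∀ (n : Nat) (lo : Int),
    (63 - lo).toNat ≤ n → (∀ b, lo ≤ b → b ≤ 62 → ¬ totalLen file b ≤ M) →
    scanA file M lo = -1 := by
  intro n
  induction n with
  | zero =>
    intro lo h hall
    rw [scanA, dif_neg (by omega)]
  | succ n ih =>
    intro lo h hall
    by_cases hl : lo < 63
    · rw [scanA, dif_pos hl]
      rw [if_neg (by rw [temp_eq]; exact hall lo le_rfl (by omega))]
      exact ih (lo + 1) (by omega) (fun b hb1 hb2 => hall b (by omega) hb2)
    · rw [scanA, dif_neg hl]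

-- ===== VERDICT (by name: the statement is the Claim_ definition above) =====
theorem find_min_base_spec : Claim_equal_find_min_base := by
  intro file M _
  unfold Spec_find_min_base find_min_base
  rw [show find_min_base_alt file M =
        (if totalLen file (bsearch file M 10 62) ≤ M then bsearch file M 10 62 else -1) from rfl]
  obtain ⟨r1, r2, r3, r4⟩ := bsearch_spec file M 52 10 62 (by norm_num) (by norm_num) (by norm_num)
  by_cases hok : totalLen file (bsearch file M 10 62) ≤ M
  · rw [if_pos hok]
    exact scanA_found file M (bsearch file M 10 62 - 10).toNat 10 _ le_rfl r1 r2 r3 hok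
  · rw [if_neg hok]
    have h62 : bsearch file M 10 62 = 62 := by rcases r4 with h' | h' <;> [exact absurd h' hok; exact h']
    refine scanA_none file M 53 10 (by norm_num) (fun b hb1 hb2 => ?_)
    by_cases hb : b < bsearch file M 10 62
    · exact r3 b hb1 hb
    · have hbe : b = bsearch file M 10 62 := by omega
      rw [hbe]; exact hok
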